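-- pv_equiv track=rewrite | github.com/LCamel/HashList | doc/scene.py | getLevelLengths
-- ===== SOURCE A (Python) =====
-- def getLevelLengths(len, W, H):
--     lengths = [0] * H
--     zeroIfLessThan = 0  # W^0 + W^1 + W^2 ... (1 + 4 + 16 + ...)
--     for lv in range(H):
--         pow = W ** lv
--         zeroIfLessThan += pow
--         lvLen = 0 if len < zeroIfLessThan else (len - zeroIfLessThan) // pow % W + 1
--         lengths[lv] = lvLen
--         if lvLen == 0:
--             break
--     return lengths
-- ===== SOURCE B (Python) =====
-- def getLevelLengths(len, W, H):
--     h = H if H > 0 else 0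
--     digits = []
--     n = len
--     k = 0
--     while n > 0 and k < h:
--         r = n % W
--         if r == 0:
--             r = W
--         digits.append(r)
--         n = (n - r) // W
--         k += 1
--     return digits + [0] * (h - k)
-- ===== Notes on version B (the rewrite author's own statement) =====
-- stated objective: simpler
-- what changed: A accumulates the power sum W^0+...+W^lv and computes each level length as (len - sum) // W^lv % W + 1 into a preallocated list; B keeps a single running value and extracts the same bijective base-W digits by repeated division (r = n % W, 0 mapped to W, n = (n - r) // W), padding with zeros.
-- outside the precondition, e.g. on getLevelLengths(10, -2, 3): A returns [0, 0, 0], B returns [-2, 0, 0]; on getLevelLengths(5, 0, 2): A raises ZeroDivisionError, B raises ZeroDivisionError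
import Mathlib
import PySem

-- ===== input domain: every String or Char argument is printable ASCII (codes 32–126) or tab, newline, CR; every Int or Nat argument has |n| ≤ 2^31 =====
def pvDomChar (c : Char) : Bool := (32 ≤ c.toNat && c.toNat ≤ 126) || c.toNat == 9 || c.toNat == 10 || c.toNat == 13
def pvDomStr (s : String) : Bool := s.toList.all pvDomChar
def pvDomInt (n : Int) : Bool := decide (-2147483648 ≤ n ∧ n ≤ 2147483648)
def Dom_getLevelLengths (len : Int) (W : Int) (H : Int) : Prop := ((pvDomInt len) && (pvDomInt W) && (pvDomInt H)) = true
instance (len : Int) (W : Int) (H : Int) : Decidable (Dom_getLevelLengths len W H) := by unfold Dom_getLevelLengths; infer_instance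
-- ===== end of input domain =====

-- B replaces A's cumulative-power-sum subtraction by plain repeated division extracting
-- bijective base-W digits (objective: simpler). Equivalence is claimed on Pre_ below.

-- ===== PORT A =====
-- loop 'for lv in range(H)' with early break, writing into the preallocated list
def pvGoA (len W : Int) : Nat → Nat → Int → List Int → List Int
  | 0, _, _, lengths => lengths
  | fuel+1, lv, zilt, lengths =>
    let pow : Int := W ^ lv
    let zilt' := zilt + pow
    let lvLen : Int :=
      if len < zilt' then 0
      else PySem.Int.mod (PySem.Int.floordiv (len - zilt') pow) W + 1
    let lengths' := lengths.set lv lvLen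
    if lvLen = 0 then lengths' else pvGoA len W fuel (lv+1) zilt' lengths'

def getLevelLengths (len : Int) (W : Int) (H : Int) : List Int :=
  pvGoA len W H.toNat 0 0 (List.replicate H.toNat 0)

-- ===== PORT B =====
-- the while loop: extract bijective base-W digits by repeated division (fuel = h - k)
def pvGoB (W : Int) : Nat → Int → List Int
  | 0, _ => []
  | fuel+1, n =>
    if 0 < n then
      let r := PySem.Int.mod n W
      let r' := if r = 0 then W else r
      r' :: pvGoB W fuel (PySem.Int.floordiv (n - r') W)
    else []

def getLevelLengths_alt (len : Int) (W : Int) (H : Int) : List Int :=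
  let h : Nat := (if H > 0 then H else 0).toNat
  let digits := pvGoB W h len
  digits ++ List.replicate (h - digits.length) 0

-- ===== PRECONDITION & SPEC =====
-- Pre_ excludes W ≤ 0 when len ≥ 1 and H ≥ 1 (the only inputs where the loop body runs with a
-- non-positive width): there A either divides/mods by zero (W = 0 raises ZeroDivisionError) or, for
-- negative W, returns power-sum artefacts with Python's divisor-sign modulo that are no more a
-- 'level length' than B's digits; the tree width is meaningfully ≥ 1.
def Pre_getLevelLengths (len : Int) (W : Int) (H : Int) : Prop :=
  1 ≤ W ∨ len ≤ 0 ∨ H ≤ 0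
instance (len : Int) (W : Int) (H : Int) : Decidable (Pre_getLevelLengths len W H) := by
  unfold Pre_getLevelLengths; infer_instance

def pvWitness_getLevelLengths : Int × Int × Int := (5, 2, 3)

def Spec_getLevelLengths (len : Int) (W : Int) (H : Int) (out : List Int) : Prop := out = getLevelLengths_alt len W H
instance (len : Int) (W : Int) (H : Int) (out : List Int) : Decidable (Spec_getLevelLengths len W H out) := by unfold Spec_getLevelLengths; infer_instance

-- ===== CLAIM (what is proved, stated in full; the proofs are below) =====
def Claim_equal_getLevelLengths : Prop := ∀ (len : Int) (W : Int) (H : Int), Dom_getLevelLengths len W H → Pre_getLevelLengths len W H → Spec_getLevelLengths len W H (getLevelLengths len W H)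

-- ===== LEMMAS AND PROOFS =====

-- the padded B-suffix produced from fuel levels and running value n
def bSuffix (W : Int) (fuel : Nat) (n : Int) : List Int :=
  pvGoB W fuel n ++ List.replicate (fuel - (pvGoB W fuel n).length) 0

lemma ediv_neg_iff {a b : Int} (hb : 0 < b) : a / b < 0 ↔ a < 0 := by
  constructor
  · intro h; by_contra hc; push Not at hc
    exact absurd (Int.ediv_nonneg hc hb.le) (by omega)
  · intro h; by_contra hc; push Not at hc
    have hr := Int.emod_nonneg a (by omega : b ≠ 0)
    have he := Int.ediv_add_emod a b
    nlinarith [mul_nonneg hb.le hc]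

-- main invariant lemma: A's loop from level lv equals kept prefix ++ B's padded digits,
-- provided n = (len - zilt) // W^lv and the untouched tail of acc is zero.
lemma go_eq (len W : Int) (hW : 1 ≤ W) :
    ∀ (fuel lv : Nat) (zilt n : Int) (acc : List Int),
      n = (len - zilt) / (W ^ lv) →
      acc.length = lv + fuel →
      acc.drop lv = List.replicate fuel 0 →
      pvGoA len W fuel lv zilt acc = acc.take lv ++ bSuffix W fuel n := by
  intro fuel
  induction fuel with
  | zero =>
    intro lv zilt n acc hn hlen hdrop
    simp [pvGoA, bSuffix, pvGoB]
    omega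
  | succ f ih =>
    intro lv zilt n acc hn hlen hdrop
    have hp : (0:Int) < W ^ lv := pow_pos (by omega) lv
    have hlv : lv < acc.length := by rw [hlen]; omega
    have hfd : PySem.Int.floordiv (len - (zilt + W ^ lv)) (W ^ lv)
        = (len - (zilt + W ^ lv)) / (W ^ lv) :=
      PySem.Int.floordiv_eq_ediv_of_pos hp
    have hshift : (len - zilt) / (W ^ lv) = (len - (zilt + W ^ lv)) / (W ^ lv) + 1 := by
      have := Int.add_mul_ediv_right (len - (zilt + W ^ lv)) 1 ((pow_pos (show (0:Int) < W by omega) lv).ne')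
      rw [one_mul] at this
      rw [show len - zilt = len - (zilt + W ^ lv) + W ^ lv by ring, this]
    set q : Int := (len - (zilt + W ^ lv)) / (W ^ lv) with hq
    have hnq : n = q + 1 := by rw [hn, hshift]
    -- the loop body
    by_cases hlt : len < zilt + W ^ lv
    · -- lvLen = 0 : break; B's n is ≤ 0
      have hqneg : q < 0 := (ediv_neg_iff hp).mpr (by omega)
      have haccLv : acc[lv]'hlv = (0:Int) := by
        have h0 : acc[lv]? = some 0 := by
          have := congrArg (fun l => l[0]?) hdrop
          simpa [List.getElem?_drop] using this
        exact (List.getElem_eq_iff hlv).mpr h0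
      have hacc0 : acc.set lv 0 = acc := by
        rw [← haccLv]; exact List.set_getElem_self hlv
      have hngt : ¬ (0 < n) := by omega
      have hsfx : bSuffix W (f+1) n = List.replicate (f+1) 0 := by
        simp [bSuffix, pvGoB, hngt]
      simp only [pvGoA, if_pos hlt, reduceIte]
      rw [hacc0, hsfx, ← hdrop, List.take_append_drop]
    · -- lvLen = q % W + 1 ; show it equals B's digit and recurse
      push Not at hlt
      have hq0 : 0 ≤ q := Int.ediv_nonneg (by omega) hp.le
      have hfm : PySem.Int.mod n W = n % W := PySem.Int.mod_eq_emod_of_pos (by omega)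
      -- digit arithmetic: let s = q % W
      have hWpos : (0:Int) < W := by omega
      have hs0 : 0 ≤ q % W := Int.emod_nonneg q (by omega)
      have hsW : q % W < W := Int.emod_lt_of_pos q hWpos
      have hqdecomp : q = W * (q / W) + q % W := (Int.ediv_add_emod q W).symm
      have hn1 : n % W = (q % W + 1) % W := by
        rw [hnq]
        conv_lhs => rw [hqdecomp]
        rw [show W * (q / W) + q % W + 1 = q % W + 1 + W * (q / W) by ring,
            Int.add_mul_emod_self_left]
      have hdigit : (if n % W = 0 then W else n % W) = q % W + 1 := by
        rcases eq_or_ne (q % W) (W - 1) with he | hne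
        · have : n % W = 0 := by rw [hn1, he]; simp
          rw [if_pos this]; omega
        · have hlt' : q % W + 1 < W := by omega
          have : n % W = q % W + 1 := by rw [hn1]; exact Int.emod_eq_of_lt (by omega) hlt'
          rw [this, if_neg (by omega)]
      -- new running value
      have hnewn : PySem.Int.floordiv (n - (q % W + 1)) W = (len - (zilt + W ^ lv)) / (W ^ (lv+1)) := by
        have h1 : n - (q % W + 1) = (q / W) * W := by rw [hnq]; linear_combination hqdecomp
        rw [PySem.Int.floordiv_eq_ediv_of_pos hWpos, h1,
            Int.mul_ediv_cancel _ (by omega : W ≠ 0)]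
        rw [hq, Int.ediv_ediv_of_nonneg hp.le, ← pow_succ]
      have hpos : 0 < n := by omega
      -- unfold one step of A
      simp only [pvGoA, if_neg (not_lt.mpr hlt), hfd,
        PySem.Int.mod_eq_emod_of_pos hWpos]
      rw [if_neg (by omega : ¬ (q % W + 1 = (0:Int)))]
      -- unfold one step of B's suffix
      have hsfx : bSuffix W (f+1) n
          = (q % W + 1) :: bSuffix W f ((len - (zilt + W ^ lv)) / (W ^ (lv+1))) := by
        simp only [bSuffix, pvGoB, if_pos hpos, hfm, hdigit, hnewn]
        simp [List.length_cons]
      rw [hsfx]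
      have hdropcons : acc.drop lv = 0 :: List.replicate f 0 := by
        rw [hdrop]; rfl
      have htl : (acc.set lv (q % W + 1)).drop (lv+1) = List.replicate f 0 := by
        rw [List.drop_set_of_lt (by omega)]
        have := congrArg List.tail hdropcons
        simpa [List.tail_drop] using this
      rw [ih (lv+1) (zilt + W ^ lv) _ (acc.set lv (q % W + 1)) rfl (by simp only [List.length_set, hlen]; omega) htl]
      have htake : (acc.set lv (q % W + 1)).take (lv+1) = acc.take lv ++ [q % W + 1] := by
        rw [List.take_add_one, List.take_set_of_le (le_refl lv)]
        congr 1
        simp [List.getElem?_set_self', List.getElem?_eq_getElem hlv]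
      rw [htake, List.append_assoc]
      rfl

lemma alt_eq_bSuffix (len W H : Int) : getLevelLengths_alt len W H = bSuffix W H.toNat len := by
  unfold getLevelLengths_alt bSuffix
  have hh : (if H > 0 then H else 0).toNat = H.toNat := by split_ifs <;> omega
  simp only [hh]

-- ===== VERDICT (by name: the statement is the Claim_ definition above) =====
theorem getLevelLengths_spec : Claim_equal_getLevelLengths := by
  intro len W H _ hpre
  unfold Spec_getLevelLengths
  rw [alt_eq_bSuffix]
  unfold getLevelLengths
  by_cases hW : 1 ≤ W
  · rw [go_eq len W hW H.toNat 0 0 len (List.replicate H.toNat 0) (by simp) (by simp) (by simp)]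
    simp
  · have hl0 : len ≤ 0 ∨ H ≤ 0 := by
      rcases hpre with h | h | h
      · exact absurd h hW
      · exact Or.inl h
      · exact Or.inr h
    rcases hl0 with hlen0 | hH0
    · cases hk : H.toNat with
      | zero => simp [pvGoA, bSuffix, pvGoB]
      | succ f =>
        have h1 : len < 0 + W ^ (0:Nat) := by simp; omega
        have h2 : ¬ (0 < len) := by omega
        simp only [pvGoA, if_pos h1, reduceIte, bSuffix,
          pvGoB, if_neg h2]
        simp [List.replicate_succ]
    · have h0 : H.toNat = 0 := by omega
      simp [h0, pvGoA, bSuffix, pvGoB]
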